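-- pv_equiv track=rewrite | github.com/SirBM201/Naija-tax-guide-api | app/services/ask_service.py | _intent_compatible
-- ===== SOURCE A (Python) =====
-- def _intent_compatible(query_intent: str, candidate_intent: str) -> bool:
--     q = (query_intent or "general").strip().lower()
--     c = (candidate_intent or "general").strip().lower()
--
--     if q == c:
--         return True
--
--     compatible_groups = [
--         {"definition", "general"},
--         {"how_to", "general"},
--         {"registration_process", "how_to"},
--         {"filing_process", "how_to"},
--     ]
--
--     for group in compatible_groups:
--         if q in group and c in group:
--             return True
--
--     return False
-- ===== SOURCE B (Python) =====
-- # Each intent carries a bitmask of topic features; two intents are compatible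
-- # iff they are equal or their feature masks intersect.
-- _FEATURES = {
--     "definition": 0b0001,
--     "general": 0b0011,
--     "how_to": 0b1110,
--     "registration_process": 0b0100,
--     "filing_process": 0b1000,
-- }
--
--
-- def _intent_compatible(query_intent: str, candidate_intent: str) -> bool:
--     q = (query_intent or "general").strip().lower()
--     c = (candidate_intent or "general").strip().lower()
--     return q == c or (_FEATURES.get(q, 0) & _FEATURES.get(c, 0)) != 0
-- ===== Notes on version B (the rewrite author's own statement) =====
-- stated objective: alternative
-- what changed: Replaces the per-call scan over a list of compatibility group sets with a feature-bitmask encoding: each intent maps to a bitmask of topics and two intents are compatible iff equal or their masks intersect (bitwise AND nonzero).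
import Mathlib
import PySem

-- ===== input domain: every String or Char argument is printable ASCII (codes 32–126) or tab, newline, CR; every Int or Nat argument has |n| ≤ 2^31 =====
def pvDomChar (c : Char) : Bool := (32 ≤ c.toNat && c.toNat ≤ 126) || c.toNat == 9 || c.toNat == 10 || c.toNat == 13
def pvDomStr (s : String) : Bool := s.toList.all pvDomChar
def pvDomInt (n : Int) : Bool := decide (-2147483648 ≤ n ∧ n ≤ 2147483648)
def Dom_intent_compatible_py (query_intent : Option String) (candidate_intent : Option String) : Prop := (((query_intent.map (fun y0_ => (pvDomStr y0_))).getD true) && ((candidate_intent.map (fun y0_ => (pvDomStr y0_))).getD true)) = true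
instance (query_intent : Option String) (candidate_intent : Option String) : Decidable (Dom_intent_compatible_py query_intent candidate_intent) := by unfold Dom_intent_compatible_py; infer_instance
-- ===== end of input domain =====

-- B encodes each intent as a bitmask of topic features and decides compatibility by equality or bitwise mask intersection, instead of A's scan over group sets.

-- ===== PORT A =====
-- (query_intent or "general").strip().lower()  — Python 'or' treats None and "" as falsy
def pvNormA (x : Option String) : String :=
  PySem.Str.lower (PySem.Str.strip (match x with
    | none => "general"
    | some s => if s == "" then "general" else s))

def intent_compatible_py (query_intent : Option String) (candidate_intent : Option String) : Bool :=
  let q := pvNormA query_intent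
  let c := pvNormA candidate_intent
  if q == c then true
  else
    let compatible_groups : List (PySem.Set String) :=
      [PySem.Set.ofList ["definition", "general"],
       PySem.Set.ofList ["how_to", "general"],
       PySem.Set.ofList ["registration_process", "how_to"],
       PySem.Set.ofList ["filing_process", "how_to"]]
    compatible_groups.any (fun group => PySem.Set.contains group q && PySem.Set.contains group c)

-- ===== PORT B =====
def pvFeatures : PySem.Dict String Int :=
  PySem.Dict.ofList
    [("definition", 1), ("general", 3), ("how_to", 14),
     ("registration_process", 4), ("filing_process", 8)]

def pvNormB (x : Option String) : String :=
  PySem.Str.lower (PySem.Str.strip (match x with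
    | none => "general"
    | some s => if s == "" then "general" else s))

def intent_compatible_py_alt (query_intent : Option String) (candidate_intent : Option String) : Bool :=
  let q := pvNormB query_intent
  let c := pvNormB candidate_intent
  q == c || (PySem.Int.band (PySem.Dict.getD pvFeatures q 0) (PySem.Dict.getD pvFeatures c 0) != 0)

-- ===== PRECONDITION & SPEC =====
def Spec_intent_compatible_py (query_intent : Option String) (candidate_intent : Option String) (out : Bool) : Prop := out = intent_compatible_py_alt query_intent candidate_intent
instance (query_intent : Option String) (candidate_intent : Option String) (out : Bool) : Decidable (Spec_intent_compatible_py query_intent candidate_intent out) := by unfold Spec_intent_compatible_py; infer_instance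

-- ===== CLAIM (what is proved, stated in full; the proofs are below) =====
def Claim_equal_intent_compatible_py : Prop := ∀ (query_intent : Option String) (candidate_intent : Option String), Dom_intent_compatible_py query_intent candidate_intent → Spec_intent_compatible_py query_intent candidate_intent (intent_compatible_py query_intent candidate_intent)

-- ===== LEMMAS AND PROOFS =====
set_option maxHeartbeats 1000000

-- The two normalizations are the same code, hence definitionally equal.
theorem pvNorm_eq (x : Option String) : pvNormA x = pvNormB x := rfl

-- The feature mask of a string, as a plain conditional (lookup in the literal dict).
theorem pv_mask_eq (q : String) :
    PySem.Dict.getD pvFeatures q 0 =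
      if q = "definition" then 1 else if q = "general" then 3 else if q = "how_to" then 14
      else if q = "registration_process" then 4 else if q = "filing_process" then 8 else 0 := by
  have h : pvFeatures = PySem.Dict.mk
      [("definition", 1), ("general", 3), ("how_to", 14),
       ("registration_process", 4), ("filing_process", 8)] := by decide
  rw [h]
  simp only [PySem.Dict.getD, PySem.Dict.get?_mk_cons]
  by_cases h1 : q = "definition" <;> by_cases h2 : q = "general" <;>
  by_cases h3 : q = "how_to" <;> by_cases h4 : q = "registration_process" <;>
  by_cases h5 : q = "filing_process" <;>
    simp_all [eq_comm (a := q), PySem.Dict.get?] <;> (split_ifs <;> rfl)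

-- Core fact: after normalization, the group scan and the mask intersection agree on all strings.
theorem pv_core_eq (q c : String) :
    (if q == c then true
     else
       [PySem.Set.ofList ["definition", "general"],
        PySem.Set.ofList ["how_to", "general"],
        PySem.Set.ofList ["registration_process", "how_to"],
        PySem.Set.ofList ["filing_process", "how_to"]].any
         (fun group => PySem.Set.contains group q && PySem.Set.contains group c))
    = (q == c || (PySem.Int.band (PySem.Dict.getD pvFeatures q 0) (PySem.Dict.getD pvFeatures c 0) != 0)) := by
  by_cases hqc : q = c
  · simp [hqc]
  · have hqc' : (q == c) = false := beq_eq_false_iff_ne.mpr hqc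
    have g1 : PySem.Set.ofList ["definition", "general"] = ["definition", "general"] := by decide
    have g2 : PySem.Set.ofList ["how_to", "general"] = ["how_to", "general"] := by decide
    have g3 : PySem.Set.ofList ["registration_process", "how_to"] = ["registration_process", "how_to"] := by decide
    have g4 : PySem.Set.ofList ["filing_process", "how_to"] = ["filing_process", "how_to"] := by decide
    rw [pv_mask_eq q, pv_mask_eq c, hqc']
    by_cases h1 : q = "definition" <;> by_cases h2 : q = "general" <;>
    by_cases h3 : q = "how_to" <;> by_cases h4 : q = "registration_process" <;>
    by_cases h5 : q = "filing_process" <;>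
    by_cases k1 : c = "definition" <;> by_cases k2 : c = "general" <;>
    by_cases k3 : c = "how_to" <;> by_cases k4 : c = "registration_process" <;>
    by_cases k5 : c = "filing_process" <;>
      simp_all [PySem.Set.contains, PySem.Int.band]

-- ===== VERDICT (by name: the statement is the Claim_ definition above) =====
theorem intent_compatible_py_spec : Claim_equal_intent_compatible_py := by
  intro qi ci _
  unfold Spec_intent_compatible_py intent_compatible_py intent_compatible_py_alt
  rw [pvNorm_eq qi, pvNorm_eq ci]
  exact pv_core_eq (pvNormB qi) (pvNormB ci)
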